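-- pv_equiv track=rewrite | github.com/Asif3359/Learn_python | FreeCodeCamp/some_basic_problem/A_Nearly_Lucky_Number.py | count_lucky
-- ===== SOURCE A (Python) =====
-- def count_lucky(n):
--     """Count the number of lucky digits in a number."""
--     cnt = 0
--     while n > 0:
--         digit = n % 10
--         if digit == 7 or digit == 4:
--             cnt += 1
--         n = n // 10
--
--     return cnt
-- ===== SOURCE B (Python) =====
-- def count_lucky(n):
--     """Count the number of lucky digits in a number."""
--     s = str(max(n, 0))
--     return s.count('4') + s.count('7')
-- ===== Notes on version B (the rewrite author's own statement) =====
-- stated objective: idiomatic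
-- what changed: Replaces the arithmetic while-loop digit extraction (n % 10, n // 10) with a single decimal-string conversion and two substring counts, clamping negatives with max so A's no-iterations behaviour on non-positive inputs is preserved.
import Mathlib
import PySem

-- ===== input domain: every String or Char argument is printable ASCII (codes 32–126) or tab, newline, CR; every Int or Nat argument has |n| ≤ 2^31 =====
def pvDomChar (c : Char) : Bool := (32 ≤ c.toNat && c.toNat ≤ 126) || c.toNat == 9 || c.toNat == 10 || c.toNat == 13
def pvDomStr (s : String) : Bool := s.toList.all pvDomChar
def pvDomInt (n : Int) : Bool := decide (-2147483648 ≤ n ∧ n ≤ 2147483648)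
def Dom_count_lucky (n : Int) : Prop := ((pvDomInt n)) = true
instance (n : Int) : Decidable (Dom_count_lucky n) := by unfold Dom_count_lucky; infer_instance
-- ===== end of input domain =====

-- B replaces A's modulo/floor-divide digit-extraction loop with one decimal-string
-- conversion and two character counts (idiomatic; same cost).

-- ===== PORT A =====
-- the while loop of A, state (n, cnt)
def count_lucky_loop (n : Int) (cnt : Int) : Int :=
  if h : n > 0 then
    let digit := PySem.Int.mod n 10
    let cnt' := if digit = 7 ∨ digit = 4 then cnt + 1 else cnt
    count_lucky_loop (PySem.Int.floordiv n 10) cnt'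
  else cnt
termination_by n.toNat
decreasing_by
  rw [PySem.Int.floordiv_eq_ediv_of_pos (by omega)]
  omega

def count_lucky (n : Int) : Int := count_lucky_loop n 0

-- ===== PORT B =====
def count_lucky_alt (n : Int) : Int :=
  let s := PySem.Int.toStr (max n 0)
  (PySem.Str.count s "4" : Int) + (PySem.Str.count s "7" : Int)

-- ===== PRECONDITION & SPEC =====
def Spec_count_lucky (n : Int) (out : Int) : Prop := out = count_lucky_alt n
instance (n : Int) (out : Int) : Decidable (Spec_count_lucky n out) := by unfold Spec_count_lucky; infer_instance

-- ===== CLAIM (what is proved, stated in full; the proofs are below) =====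
def Claim_equal_count_lucky : Prop := ∀ (n : Int), Dom_count_lucky n → Spec_count_lucky n (count_lucky n)

-- ===== LEMMAS AND PROOFS =====

-- number of lucky digits of a natural number (reference function for both sides)
def luckyL (m : Nat) : Nat :=
  if h : m = 0 then 0
  else (if m % 10 = 4 ∨ m % 10 = 7 then 1 else 0) + luckyL (m / 10)
decreasing_by exact Nat.div_lt_self (Nat.pos_of_ne_zero h) (by omega)

-- single-character Python str.count is List.count
theorem chars_count_go_singleton (c : Char) :
    ∀ (fuel : Nat) (s : List Char) (acc : Nat), s.length ≤ fuel →
      PySem.Chars.count.go [c] fuel s acc = acc + s.count c := by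
  intro fuel
  induction fuel with
  | zero =>
    intro s acc h
    cases s with
    | nil => simp [PySem.Chars.count.go]
    | cons a t => simp at h
  | succ f ih =>
    intro s acc h
    cases s with
    | nil => simp [PySem.Chars.count.go]
    | cons a t =>
      simp only [PySem.Chars.count.go]
      by_cases hc : c = a
      · subst hc
        rw [if_pos (by simp [List.isPrefixOf])]
        rw [show List.drop [c].length (c :: t) = t from rfl]
        rw [ih t (acc + 1) (by simpa using h)]
        simp
        omega
      · rw [if_neg (by simp [List.isPrefixOf]; exact fun hh => hc (by simp_all))]
        rw [ih t acc (by simpa using h)]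
        have : ¬ (a == c) = true := by simp; exact fun hh => hc hh.symm
        simp [List.count_cons, this]

theorem chars_count_singleton (s : List Char) (c : Char) :
    PySem.Chars.count s [c] = s.count c := by
  simp only [PySem.Chars.count]
  rw [if_neg (by simp)]
  simpa using chars_count_go_singleton c s.length s 0 le_rfl

-- counting '4's plus '7's is counting lucky characters
theorem count47_eq_countP (s : List Char) :
    s.count '4' + s.count '7' = s.countP (fun ch => ch = '4' ∨ ch = '7') := by
  induction s with
  | nil => simp
  | cons a t ih =>
    simp only [List.count_cons, List.countP_cons]
    by_cases h4 : a = '4' <;> by_cases h7 : a = '7' <;>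
      simp_all <;> omega

-- the lucky-character count of the decimal digits of m is luckyL m
theorem countP_toDigitsCore :
    ∀ (fuel m : Nat) (ds : List Char), m < fuel →
      (Nat.toDigitsCore 10 fuel m ds).countP (fun ch => ch = '4' ∨ ch = '7')
        = luckyL m + ds.countP (fun ch => ch = '4' ∨ ch = '7') := by
  intro fuel
  induction fuel with
  | zero => intro m ds h; omega
  | succ f ih =>
    intro m ds h
    simp only [Nat.toDigitsCore]
    have hdig : (fun ch => decide (ch = '4' ∨ ch = '7')) (Nat.digitChar (m % 10))
        = decide (m % 10 = 4 ∨ m % 10 = 7) := by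
      have h10 : m % 10 < 10 := Nat.mod_lt _ (by omega)
      interval_cases h : m % 10 <;> simp [Nat.digitChar]
    by_cases hz : m / 10 = 0
    · rw [if_pos hz]
      rw [luckyL]
      by_cases hm0 : m = 0
      · subst hm0; simp [Nat.digitChar]
      · rw [dif_neg hm0, hz, luckyL]
        simp only [List.countP_cons, hdig]
        by_cases hl : m % 10 = 4 ∨ m % 10 = 7 <;> simp [hl] <;> omega
    · rw [if_neg hz]
      have hm0 : m ≠ 0 := by
        intro hh; subst hh; simp at hz
      rw [ih (m / 10) _ (by have := Nat.div_lt_self (Nat.pos_of_ne_zero hm0) (show 1 < 10 by omega); omega)]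
      conv_rhs => rw [luckyL, dif_neg hm0]
      simp only [List.countP_cons, hdig]
      by_cases hl : m % 10 = 4 ∨ m % 10 = 7 <;> simp [hl] <;> omega

-- A's loop computes luckyL
theorem count_lucky_loop_eq (m : Nat) : ∀ (cnt : Int),
    count_lucky_loop (m : Int) cnt = cnt + (luckyL m : Int) := by
  induction m using Nat.strong_induction_on with
  | _ m ih =>
    intro cnt
    rw [count_lucky_loop]
    by_cases hm : (m : Int) > 0
    · rw [dif_pos hm]
      have hm0 : m ≠ 0 := by omega
      have hf : PySem.Int.floordiv (m : Int) 10 = ((m / 10 : Nat) : Int) := by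
        rw [show (10 : Int) = ((10 : Nat) : Int) from rfl, PySem.Int.floordiv_natCast]
      have hmod : PySem.Int.mod (m : Int) 10 = ((m % 10 : Nat) : Int) := by
        rw [show (10 : Int) = ((10 : Nat) : Int) from rfl, PySem.Int.mod_natCast]
      rw [hf, hmod]
      rw [ih (m / 10) (Nat.div_lt_self (Nat.pos_of_ne_zero hm0) (by omega))]
      conv_rhs => rw [luckyL, dif_neg hm0]
      have hcast : (((m % 10 : Nat) : Int) = 7 ∨ ((m % 10 : Nat) : Int) = 4)
          ↔ (m % 10 = 4 ∨ m % 10 = 7) := by omega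
      by_cases hl : m % 10 = 4 ∨ m % 10 = 7
      · rw [if_pos (hcast.mpr hl), if_pos hl]; push_cast; ring
      · rw [if_neg (fun hh => hl (hcast.mp hh)), if_neg hl]; push_cast; ring
    · rw [dif_neg hm]
      have hm0 : m = 0 := by omega
      subst hm0
      rw [luckyL]
      simp

-- B computes luckyL for nonnegative n
theorem count_lucky_alt_eq (m : Nat) :
    count_lucky_alt (m : Int) = (luckyL m : Int) := by
  unfold count_lucky_alt
  have hmax : max (m : Int) 0 = (m : Int) := by omega
  rw [hmax]
  have hlist : (PySem.Int.toStr (m : Int)).toList = Nat.toDigits 10 m := by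
    rw [PySem.Int.toList_toStr]
    simp [PySem.Int.toChars]
  simp only [PySem.Str.count, hlist]
  have h4 : ("4" : String).toList = ['4'] := rfl
  have h7 : ("7" : String).toList = ['7'] := rfl
  rw [h4, h7, chars_count_singleton, chars_count_singleton]
  have := countP_toDigitsCore (m + 1) m [] (by omega)
  simp only [Nat.toDigits] at *
  have hc := count47_eq_countP (Nat.toDigitsCore 10 (m + 1) m [])
  simp only [List.countP_nil, Nat.add_zero] at this
  omega

-- ===== VERDICT (by name: the statement is the Claim_ definition above) =====
theorem count_lucky_spec : Claim_equal_count_lucky := by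
  intro n _
  unfold Spec_count_lucky count_lucky
  by_cases hn : n > 0
  · obtain ⟨m, rfl⟩ : ∃ m : Nat, n = (m : Int) := ⟨n.toNat, by omega⟩
    rw [count_lucky_loop_eq m 0, count_lucky_alt_eq m]
    ring
  · rw [count_lucky_loop, dif_neg hn]
    have hmax : max n 0 = (0 : Int) := max_eq_right (by omega)
    unfold count_lucky_alt
    rw [hmax]
    decide
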